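-- pv_equiv track=rewrite | github.com/stitch-james/advent2022 | days/day15.py | find_cannot_contain
-- ===== SOURCE A (Python) =====
-- import operator
--
-- def find_cannot_contain(coords: list[tuple[tuple[int, int], tuple[int, int]]], target_y: int) -> list[tuple[int, int]]:
--     """Return the ranges of coordinates that cannot contain a beacon."""
--     cannot_contain: list[tuple[int, int]] = []
--     for (sx, sy), (bx, by) in coords:
--         radius = manhattan((sx, sy), (bx, by))
--         dy = abs(target_y - sy)
--         if dy <= radius:
--             x0 = sx - (radius - dy)
--             x1 = sx + (radius - dy)
--             cannot_contain.append((x0, x1))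
--     return consolidate(cannot_contain)
--
-- def manhattan(coords_0: tuple[int, int], coords_1: tuple[int, int]) -> int:
--     """Calculate the Manhattan distance between two sets of coordinates."""
--     x_0, y_0 = coords_0
--     x_1, y_1 = coords_1
--     return abs(x_0 - x_1) + abs(y_0 - y_1)
--
-- def consolidate(cannot_contain: list[tuple[int, int]]) -> list[tuple[int, int]]:
--     """Consolidate excluded coordinate ranges."""
--     result: list[tuple[int, int]] = []
--     for x0, x1 in sorted(cannot_contain, key=operator.itemgetter(0)):
--         if result and x1 <= result[-1][1]:
--             # The new range is completely within the previous one
--             pass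
--         elif result and x0 <= result[-1][1]:
--             # The new range overlaps with the old one, so combine them
--             result[-1] = result[-1][0], x1
--         else:
--             # New non-overlapping range
--             result.append((x0, x1))
--     return result
-- ===== SOURCE B (Python) =====
-- def find_cannot_contain(coords, target_y):
--     """Return the ranges of coordinates that cannot contain a beacon."""
--     # Sweep line: open/close events on the row, coverage counter merges spans.
--     events = []
--     for (sx, sy), (bx, by) in coords:
--         radius = abs(sx - bx) + abs(sy - by)
--         dy = abs(target_y - sy)
--         if dy <= radius:
--             events.append((sx - (radius - dy), 0))   # open
--             events.append((sx + (radius - dy), 1))   # close (opens sort first on ties)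
--     events.sort()
--     result = []
--     depth = 0
--     start = 0
--     for x, kind in events:
--         if kind == 0:
--             if depth == 0:
--                 start = x
--             depth += 1
--         else:
--             depth -= 1
--             if depth == 0:
--                 result.append((start, x))
--     return result
-- ===== Notes on version B (the rewrite author's own statement) =====
-- stated objective: alternative
-- what changed: Replaces A's sort-intervals-by-start-then-merge-overlaps pass with a sweep line: each interval emits an open event (x0,0) and a close event (x1,1), the events are sorted (opens before closes at equal x), and a single sweep with a coverage counter records a range start when the counter leaves 0 and emits the merged range when it returns to 0.
import Mathlib
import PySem

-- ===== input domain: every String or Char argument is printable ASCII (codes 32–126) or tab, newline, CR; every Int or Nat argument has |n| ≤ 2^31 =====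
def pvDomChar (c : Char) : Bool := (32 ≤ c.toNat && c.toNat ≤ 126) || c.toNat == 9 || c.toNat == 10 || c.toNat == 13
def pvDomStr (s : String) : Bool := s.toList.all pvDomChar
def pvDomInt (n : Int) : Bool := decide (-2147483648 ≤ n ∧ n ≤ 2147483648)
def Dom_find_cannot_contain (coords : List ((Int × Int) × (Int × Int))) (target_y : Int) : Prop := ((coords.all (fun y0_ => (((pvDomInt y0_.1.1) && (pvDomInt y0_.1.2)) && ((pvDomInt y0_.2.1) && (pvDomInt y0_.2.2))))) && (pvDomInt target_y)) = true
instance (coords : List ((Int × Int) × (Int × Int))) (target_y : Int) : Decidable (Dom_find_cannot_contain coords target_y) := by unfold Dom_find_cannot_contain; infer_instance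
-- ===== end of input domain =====

-- B replaces A's sort-intervals-then-merge-overlaps pass with a sweep line over sorted
-- open/close events and a coverage counter (alternative algorithm, same cost).


-- ===== PORT A =====
def manhattan (coords_0 : Int × Int) (coords_1 : Int × Int) : Int :=
  |coords_0.1 - coords_1.1| + |coords_0.2 - coords_1.2|

-- the loop body of consolidate: result[-1] is getLast?, replacement of result[-1] is dropLast ++ [·]
def consolidateStep (result : List (Int × Int)) (p : Int × Int) : List (Int × Int) :=
  match result.getLast? with
  | none => result ++ [(p.1, p.2)]
  | some last =>
    if p.2 ≤ last.2 then result
    else if p.1 ≤ last.2 then result.dropLast ++ [(last.1, p.2)]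
    else result ++ [(p.1, p.2)]

def consolidate (cannot_contain : List (Int × Int)) : List (Int × Int) :=
  (PySem.List.sorted cannot_contain (fun p => p.1) false).foldl consolidateStep []

def find_cannot_contain (coords : List ((Int × Int) × (Int × Int))) (target_y : Int) : List (Int × Int) :=
  let cannot_contain := coords.foldl (fun acc c =>
    let radius := manhattan c.1 c.2
    let dy := |target_y - c.1.2|
    if dy ≤ radius then acc ++ [(c.1.1 - (radius - dy), c.1.1 + (radius - dy))] else acc) []
  consolidate cannot_contain

-- ===== PORT B =====
-- the body of B's sweep loop: state = (result, depth, start); event = (x, kind)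
def sweepStep (st : List (Int × Int) × Int × Int) (ev : Int × Int) : List (Int × Int) × Int × Int :=
  if ev.2 = 0 then
    (st.1, st.2.1 + 1, if st.2.1 = 0 then ev.1 else st.2.2)
  else
    (if st.2.1 - 1 = 0 then st.1 ++ [(st.2.2, ev.1)] else st.1, st.2.1 - 1, st.2.2)

def find_cannot_contain_alt (coords : List ((Int × Int) × (Int × Int))) (target_y : Int) : List (Int × Int) :=
  let events := coords.foldl (fun acc c =>
    let radius := |c.1.1 - c.2.1| + |c.1.2 - c.2.2|
    let dy := |target_y - c.1.2|
    if dy ≤ radius then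
      acc ++ [(c.1.1 - (radius - dy), 0), (c.1.1 + (radius - dy), 1)]
    else acc) []
  ((PySem.List.sorted2 events (fun e => e.1) (fun e => e.2) false).foldl sweepStep ([], 0, 0)).1

-- ===== PRECONDITION & SPEC =====
def Spec_find_cannot_contain (coords : List ((Int × Int) × (Int × Int))) (target_y : Int) (out : List (Int × Int)) : Prop := out = find_cannot_contain_alt coords target_y
instance (coords : List ((Int × Int) × (Int × Int))) (target_y : Int) (out : List (Int × Int)) : Decidable (Spec_find_cannot_contain coords target_y out) := by unfold Spec_find_cannot_contain; infer_instance

-- ===== CLAIM (what is proved, stated in full; the proofs are below) =====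
def Claim_equal_find_cannot_contain : Prop := ∀ (coords : List ((Int × Int) × (Int × Int))) (target_y : Int), Dom_find_cannot_contain coords target_y → Spec_find_cannot_contain coords target_y (find_cannot_contain coords target_y)

-- ===== LEMMAS AND PROOFS =====

-- the per-sensor row intervals both programs build
def spans (coords : List ((Int × Int) × (Int × Int))) (target_y : Int) : List (Int × Int) :=
  coords.filterMap (fun c =>
    let r := |c.1.1 - c.2.1| + |c.1.2 - c.2.2|
    let dy := |target_y - c.1.2|
    if dy ≤ r then some (c.1.1 - (r - dy), c.1.1 + (r - dy)) else none)

-- the two events of an interval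
def evPair (p : Int × Int) : List (Int × Int) := [(p.1, 0), (p.2, 1)]

-- lexicographic ≤ on events (Python's tuple order)
def lexLe (a b : Int × Int) : Bool := decide (a.1 < b.1 ∨ (a.1 = b.1 ∧ a.2 ≤ b.2))

def lexP (a b : Int × Int) : Prop := lexLe a b = true

theorem lexP_iff (a b : Int × Int) : lexP a b ↔ (a.1 < b.1 ∨ (a.1 = b.1 ∧ a.2 ≤ b.2)) := by
  simp [lexP, lexLe]

-- ordered insertion of one event (after equal elements)
def insEv (v : Int × Int) : List (Int × Int) → List (Int × Int)
  | [] => [v]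
  | w :: ws => if lexLe w v then w :: insEv v ws else v :: w :: ws

-- the sorted event list of a start-sorted interval list
def sevs : List (Int × Int) → List (Int × Int)
  | [] => []
  | p :: t => (p.1, 0) :: insEv (p.2, 1) (sevs t)

-- insert a sorted batch of pending close events
def insAll (C : List Int) (E : List (Int × Int)) : List (Int × Int) :=
  C.foldr (fun c E => insEv (c, 1) E) E

-- last element of a pending-close list (total; 0 for the empty list)
def lastD (C : List Int) : Int := C.getLast?.getD 0

-- the merge loop both programs reduce to: state = (merged, current span (s, e))
def mergeStep (acc : List (Int × Int) × Int × Int) (p : Int × Int) : List (Int × Int) × Int × Int :=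
  if p.1 ≤ acc.2.2 then (acc.1, acc.2.1, max acc.2.2 p.2)
  else (acc.1 ++ [(acc.2.1, acc.2.2)], p.1, p.2)

def mergeForm : List (Int × Int) → List (Int × Int)
  | [] => []
  | p :: rest =>
    let st := rest.foldl mergeStep ([], p.1, p.2)
    st.1 ++ [(st.2.1, st.2.2)]

-- ---------- basic facts about insEv / sevs / insAll ----------

theorem mem_insEv (v : Int × Int) : ∀ (l : List (Int × Int)) (a : Int × Int),
    a ∈ insEv v l ↔ a = v ∨ a ∈ l := by
  intro l
  induction l with
  | nil => intro a; simp [insEv]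
  | cons w ws ih =>
    intro a
    simp only [insEv]
    split_ifs with h
    · simp only [List.mem_cons, ih]
      tauto
    · simp only [List.mem_cons]

theorem insEv_perm (v : Int × Int) : ∀ (l : List (Int × Int)), (insEv v l).Perm (v :: l) := by
  intro l
  induction l with
  | nil => exact List.Perm.refl _
  | cons w ws ih =>
    simp only [insEv]
    split_ifs with h
    · exact (ih.cons w).trans (List.Perm.swap v w ws)
    · exact List.Perm.refl _

theorem lexP_total (a b : Int × Int) (h : ¬ lexP a b) : lexP b a := by
  rw [lexP_iff] at *
  omega

theorem lexP_trans (a b c : Int × Int) (h1 : lexP a b) (h2 : lexP b c) : lexP a c := by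
  rw [lexP_iff] at *
  omega

theorem lexP_antisymm (a b : Int × Int) (h1 : lexP a b) (h2 : lexP b a) : a = b := by
  rw [lexP_iff] at h1 h2
  refine Prod.ext_iff.mpr ⟨by omega, by omega⟩

theorem insEv_pairwise (v : Int × Int) : ∀ (l : List (Int × Int)),
    l.Pairwise lexP → (insEv v l).Pairwise lexP := by
  intro l
  induction l with
  | nil => intro _; simp [insEv, List.pairwise_cons]
  | cons w ws ih =>
    intro h
    obtain ⟨hw, hws⟩ := List.pairwise_cons.mp h
    simp only [insEv]
    split_ifs with hwv
    · refine List.pairwise_cons.mpr ⟨?_, ih hws⟩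
      intro x hx
      rcases (mem_insEv v ws x).mp hx with rfl | hx'
      · exact hwv
      · exact hw x hx'
    · refine List.pairwise_cons.mpr ⟨?_, h⟩
      intro x hx
      have hvw : lexP v w := lexP_total w v hwv
      rcases List.mem_cons.mp hx with rfl | hx'
      · exact hvw
      · exact lexP_trans v w x hvw (hw x hx')

theorem insEv_eq_cons (v : Int × Int) : ∀ (l : List (Int × Int)),
    (∀ w ∈ l, lexP w v → w = v) → insEv v l = v :: l := by
  intro l
  induction l with
  | nil => intro _; rfl
  | cons w ws ih =>
    intro h
    simp only [insEv]
    split_ifs with hwv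
    · have hwe : w = v := h w (List.mem_cons_self ..) hwv
      rw [ih (fun x hx hlex => h x (List.mem_cons_of_mem _ hx) hlex), hwe]
    · rfl

theorem mem_sevs : ∀ (t : List (Int × Int)) (a : Int × Int),
    a ∈ sevs t → ∃ p ∈ t, a = (p.1, 0) ∨ a = (p.2, 1) := by
  intro t
  induction t with
  | nil => intro a ha; simp [sevs] at ha
  | cons p t' ih =>
    intro a ha
    simp only [sevs, List.mem_cons] at ha
    rcases ha with rfl | ha
    · exact ⟨p, List.mem_cons_self .., Or.inl rfl⟩
    · rcases (mem_insEv _ _ _).mp ha with rfl | ha'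
      · exact ⟨p, List.mem_cons_self .., Or.inr rfl⟩
      · obtain ⟨q, hq, hh⟩ := ih a ha'
        exact ⟨q, List.mem_cons_of_mem _ hq, hh⟩

theorem sevs_perm : ∀ (t : List (Int × Int)), (sevs t).Perm (t.flatMap evPair) := by
  intro t
  induction t with
  | nil => exact List.Perm.refl _
  | cons p t' ih =>
    have h1 : (sevs (p :: t')).Perm ((p.1, 0) :: (p.2, 1) :: sevs t') :=
      (insEv_perm (p.2, 1) (sevs t')).cons (p.1, 0)
    have h2 : ((p.1, 0) :: (p.2, 1) :: sevs t').Perm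
        ((p.1, 0) :: (p.2, 1) :: t'.flatMap evPair) := (ih.cons _).cons _
    have h3 : (p :: t').flatMap evPair = (p.1, 0) :: (p.2, 1) :: t'.flatMap evPair := by
      simp [evPair]
    rw [h3]
    exact h1.trans h2

theorem sevs_pairwise : ∀ (t : List (Int × Int)),
    t.Pairwise (fun p q => p.1 ≤ q.1) → (∀ p ∈ t, p.1 ≤ p.2) →
    (sevs t).Pairwise lexP := by
  intro t
  induction t with
  | nil => intro _ _; simp [sevs]
  | cons p t' ih =>
    intro hs hw
    obtain ⟨hp_head, hs'⟩ := List.pairwise_cons.mp hs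
    have hw' : ∀ q ∈ t', q.1 ≤ q.2 := fun q hq => hw q (List.mem_cons_of_mem _ hq)
    have hpw : p.1 ≤ p.2 := hw p (List.mem_cons_self ..)
    simp only [sevs]
    refine List.pairwise_cons.mpr ⟨?_, insEv_pairwise _ _ (ih hs' hw')⟩
    intro a ha
    rcases (mem_insEv _ _ _).mp ha with rfl | ha'
    · rw [lexP_iff]; simp; omega
    · obtain ⟨q, hq, hh⟩ := mem_sevs t' a ha'
      have h1 : p.1 ≤ q.1 := hp_head q hq
      have h2 : q.1 ≤ q.2 := hw' q hq
      rcases hh with rfl | rfl <;> (rw [lexP_iff]; simp; omega)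

theorem insAll_nil_E (E : List (Int × Int)) : insAll [] E = E := rfl

theorem insAll_cons (c : Int) (C : List Int) (E : List (Int × Int)) :
    insAll (c :: C) E = insEv (c, 1) (insAll C E) := rfl

theorem mem_insAll : ∀ (C : List Int) (E : List (Int × Int)) (a : Int × Int),
    a ∈ insAll C E ↔ (∃ c ∈ C, a = (c, 1)) ∨ a ∈ E := by
  intro C
  induction C with
  | nil => intro E a; simp [insAll]
  | cons c C' ih =>
    intro E a
    rw [insAll_cons, mem_insEv, ih]
    simp only [List.mem_cons, exists_eq_or_imp]
    exact or_assoc.symm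

theorem insAll_pairwise : ∀ (C : List Int) (E : List (Int × Int)),
    E.Pairwise lexP → (insAll C E).Pairwise lexP := by
  intro C
  induction C with
  | nil => intro E h; exact h
  | cons c C' ih =>
    intro E h
    rw [insAll_cons]
    exact insEv_pairwise _ _ (ih E h)

theorem insAll_perm : ∀ (C : List Int) (E : List (Int × Int)),
    (insAll C E).Perm (C.map (fun c => ((c : Int), (1 : Int))) ++ E) := by
  intro C
  induction C with
  | nil => intro E; exact List.Perm.refl _
  | cons c C' ih =>
    intro E
    rw [insAll_cons, List.map_cons, List.cons_append]
    exact (insEv_perm _ _).trans ((ih E).cons _)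

-- two sorted permutations of the same event multiset are equal
theorem eq_of_sorted_perm : ∀ (l₁ l₂ : List (Int × Int)), l₁.Perm l₂ →
    l₁.Pairwise lexP → l₂.Pairwise lexP → l₁ = l₂ := by
  intro l₁
  induction l₁ with
  | nil =>
    intro l₂ h _ _
    exact h.nil_eq
  | cons a t ih =>
    intro l₂ h h₁ h₂
    cases l₂ with
    | nil => exact absurd h.symm.nil_eq (by simp)
    | cons b t₂ =>
      have hab : a = b := by
        have ha : a ∈ b :: t₂ := h.subset (List.mem_cons_self ..)
        have hb : b ∈ a :: t := h.symm.subset (List.mem_cons_self ..)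
        rcases List.mem_cons.mp ha with h1 | h1
        · exact h1
        rcases List.mem_cons.mp hb with h2 | h2
        · exact h2.symm
        exact lexP_antisymm a b ((List.pairwise_cons.mp h₁).1 b h2)
          ((List.pairwise_cons.mp h₂).1 a h1)
      subst hab
      have ht : t.Perm t₂ := h.cons_inv
      rw [ih t₂ ht (List.pairwise_cons.mp h₁).2 (List.pairwise_cons.mp h₂).2]

theorem insAll_congr (C C' : List Int) (E : List (Int × Int))
    (hE : E.Pairwise lexP) (hp : C.Perm C') : insAll C E = insAll C' E := by
  refine eq_of_sorted_perm _ _ ?_ (insAll_pairwise _ _ hE) (insAll_pairwise _ _ hE)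
  exact (insAll_perm C E).trans (((hp.map _).append_right E).trans (insAll_perm C' E).symm)

-- ---------- relating PySem's sorted2 to insEv ----------

theorem insertBy_eq_insEv : ∀ (l : List (Int × Int)) (v : Int × Int),
    PySem.List.insertBy
      (fun a b => decide (a.1 < b.1) || (!decide (b.1 < a.1) && decide (a.2 < b.2))) v l
      = insEv v l := by
  intro l
  induction l with
  | nil => intro v; rfl
  | cons w ws ih =>
    intro v
    show (if (decide (v.1 < w.1) || (!decide (w.1 < v.1) && decide (v.2 < w.2))) = true
        then v :: w :: ws
        else w :: PySem.List.insertBy _ v ws) = insEv v (w :: ws)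
    simp only [insEv]
    by_cases hlex : lexLe w v = true
    · have hb : (decide (v.1 < w.1) || (!decide (w.1 < v.1) && decide (v.2 < w.2))) = false := by
        simp only [lexLe, decide_eq_true_eq] at hlex
        simp only [Bool.or_eq_false_iff, Bool.and_eq_false_iff, Bool.not_eq_false',
          decide_eq_false_iff_not, decide_eq_true_eq]
        omega
      rw [hb, if_pos hlex, if_neg (by simp), ih]
    · have hb : (decide (v.1 < w.1) || (!decide (w.1 < v.1) && decide (v.2 < w.2))) = true := by
        simp only [lexLe, decide_eq_true_eq] at hlex
        simp only [Bool.or_eq_true, Bool.and_eq_true, Bool.not_eq_true',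
          decide_eq_false_iff_not, decide_eq_true_eq]
        omega
      rw [hb, if_neg hlex, if_pos rfl]

theorem sorted2_eq_foldl_insEv (xs : List (Int × Int)) :
    PySem.List.sorted2 xs (fun e => e.1) (fun e => e.2) false
      = xs.foldl (fun acc v => insEv v acc) [] := by
  exact PySem.List.foldl_congr_mem xs _ _ [] (fun acc x _ => insertBy_eq_insEv acc x)

theorem foldl_insEv_pairwise : ∀ (xs : List (Int × Int)) (acc : List (Int × Int)),
    acc.Pairwise lexP → (xs.foldl (fun acc v => insEv v acc) acc).Pairwise lexP := by
  intro xs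
  induction xs with
  | nil => intro acc h; exact h
  | cons x xs' ih =>
    intro acc h
    exact ih _ (insEv_pairwise _ _ h)

theorem foldl_insEv_perm : ∀ (xs : List (Int × Int)) (acc : List (Int × Int)),
    (xs.foldl (fun acc v => insEv v acc) acc).Perm (acc ++ xs) := by
  intro xs
  induction xs with
  | nil => intro acc; simp
  | cons x xs' ih =>
    intro acc
    have h3 : ((x :: acc) ++ xs').Perm (acc ++ x :: xs') := by
      rw [List.cons_append]
      exact List.perm_middle.symm
    exact (ih _).trans (((insEv_perm x acc).append_right xs').trans h3)

-- ---------- the sorted event list is sevs of the start-sorted spans ----------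

theorem spans_wf (coords : List ((Int × Int) × (Int × Int))) (target_y : Int) :
    ∀ p ∈ spans coords target_y, p.1 ≤ p.2 := by
  intro p hp
  simp only [spans, List.mem_filterMap] at hp
  obtain ⟨c, _, hc⟩ := hp
  by_cases h : |target_y - c.1.2| ≤ |c.1.1 - c.2.1| + |c.1.2 - c.2.2|
  · simp only [if_pos h] at hc
    cases hc
    simp only
    omega
  · simp only [if_neg h] at hc
    cases hc

theorem sortedEvents_eq_sevs (sp : List (Int × Int)) (hw : ∀ p ∈ sp, p.1 ≤ p.2) :
    PySem.List.sorted2 (sp.flatMap evPair) (fun e => e.1) (fun e => e.2) false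
      = sevs (PySem.List.sorted sp (fun p => p.1) false) := by
  have hLperm : (PySem.List.sorted sp (fun p => p.1) false).Perm sp :=
    PySem.List.sorted_perm sp (fun p => p.1) false
  have hLp : (PySem.List.sorted sp (fun p => p.1) false).Pairwise (fun p q => p.1 ≤ q.1) :=
    PySem.List.sorted_pairwise sp (fun p => p.1)
  have hLw : ∀ p ∈ PySem.List.sorted sp (fun p => p.1) false, p.1 ≤ p.2 := by
    intro p hp
    exact hw p ((PySem.List.mem_sorted sp (fun p => p.1) false p).mp hp)
  rw [sorted2_eq_foldl_insEv]
  refine eq_of_sorted_perm _ _ ?_ (foldl_insEv_pairwise _ _ (by simp))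
    (sevs_pairwise _ hLp hLw)
  have h1 : ((sp.flatMap evPair).foldl (fun acc v => insEv v acc) []).Perm
      (sp.flatMap evPair) := by
    have := foldl_insEv_perm (sp.flatMap evPair) []
    simpa using this
  have h2 : (sp.flatMap evPair).Perm
      ((PySem.List.sorted sp (fun p => p.1) false).flatMap evPair) :=
    hLperm.symm.flatMap (fun a _ => List.Perm.refl _)
  exact h1.trans (h2.trans (sevs_perm _).symm)

-- ---------- sorted Int lists: last element is the maximum ----------

theorem lastD_singleton (a : Int) : lastD [a] = a := rfl

theorem lastD_cons_cons (a b : Int) (l : List Int) : lastD (a :: b :: l) = lastD (b :: l) := by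
  simp [lastD]

theorem lastD_mem : ∀ (C : List Int), C ≠ [] → lastD C ∈ C := by
  intro C
  induction C with
  | nil => intro h; exact absurd rfl h
  | cons a C' ih =>
    intro _
    cases C' with
    | nil => simp [lastD_singleton]
    | cons b C'' =>
      rw [lastD_cons_cons]
      exact List.mem_cons_of_mem _ (ih (by simp))

theorem sorted_lastD_max : ∀ (C : List Int), C.Pairwise (· ≤ ·) →
    ∀ c ∈ C, c ≤ lastD C := by
  intro C
  induction C with
  | nil => intro _ c hc; simp at hc
  | cons a C' ih =>
    intro hs c hc
    obtain ⟨ha, hs'⟩ := List.pairwise_cons.mp hs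
    cases C' with
    | nil =>
      simp at hc
      simp [hc, lastD_singleton]
    | cons b C'' =>
      rw [lastD_cons_cons]
      rcases List.mem_cons.mp hc with rfl | hc'
      · exact le_trans (ha _ (lastD_mem (b :: C'') (by simp))) (le_refl _)
      · exact ih hs' c hc'

theorem lastD_append (l₁ l₂ : List Int) (h : l₂ ≠ []) : lastD (l₁ ++ l₂) = lastD l₂ := by
  induction l₁ with
  | nil => rfl
  | cons a l₁' ih =>
    cases hl : l₁' ++ l₂ with
    | nil => exact absurd (List.append_eq_nil_iff.mp hl).2 h
    | cons b l' =>
      rw [List.cons_append, hl, lastD_cons_cons, ← hl, ih]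

theorem dropWhile_ge (s : Int) : ∀ (C : List Int), C.Pairwise (· ≤ ·) →
    ∀ c ∈ C.dropWhile (fun c => decide (c < s)), s ≤ c := by
  intro C
  induction C with
  | nil => intro _ c hc; simp at hc
  | cons a C' ih =>
    intro hs c hc
    obtain ⟨ha, hs'⟩ := List.pairwise_cons.mp hs
    rw [List.dropWhile_cons] at hc
    split_ifs at hc with hlt
    · exact ih hs' c hc
    · simp only [decide_eq_true_eq, not_lt] at hlt
      rcases List.mem_cons.mp hc with rfl | hc'
      · exact hlt
      · exact le_trans hlt (ha c hc')

-- ---------- splitting the pending closes around the next open ----------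

theorem insAll_split (s : Int) : ∀ (C : List Int), C.Pairwise (· ≤ ·) →
    ∀ (E : List (Int × Int)), (∀ w ∈ E, s ≤ w.1) →
    insAll C ((s, 0) :: E)
      = (C.takeWhile (fun c => decide (c < s))).map (fun c => ((c : Int), (1 : Int)))
        ++ (s, 0) :: insAll (C.dropWhile (fun c => decide (c < s))) E := by
  intro C
  induction C with
  | nil => intro _ E _; simp [insAll]
  | cons c C' ih =>
    intro hs E hE
    obtain ⟨hc_head, hs'⟩ := List.pairwise_cons.mp hs
    by_cases hc : c < s
    · rw [insAll_cons, ih hs' E hE, List.takeWhile_cons, List.dropWhile_cons,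
        if_pos (by simpa using hc), if_pos (by simpa using hc)]
      rw [insEv_eq_cons]
      · rfl
      · intro w hw hlex
        rw [lexP_iff] at hlex
        rcases List.mem_append.mp hw with hw1 | hw2
        · obtain ⟨c', hc'mem, rfl⟩ := List.mem_map.mp hw1
          have h1 : c ≤ c' := hc_head c' ((List.takeWhile_sublist _).subset hc'mem)
          have : c' = c := by simp at hlex ⊢; omega
          rw [this]
        · rcases List.mem_cons.mp hw2 with rfl | hw3
          · exfalso; simp at hlex; omega
          · rcases (mem_insAll _ _ _).mp hw3 with ⟨c'', hc''mem, rfl⟩ | hwE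
            · have h1 : s ≤ c'' := dropWhile_ge s C' hs' c'' hc''mem
              exfalso; simp at hlex; omega
            · have h1 : s ≤ w.1 := hE w hwE
              exfalso; omega
    · have hcs : s ≤ c := by omega
      have htw : C'.takeWhile (fun c => decide (c < s)) = [] := by
        cases hC' : C' with
        | nil => rfl
        | cons b C'' =>
          have hb : c ≤ b := hc_head b (by simp [hC'])
          rw [List.takeWhile_cons, if_neg (by simp; omega)]
      have hdw : C'.dropWhile (fun c => decide (c < s)) = C' := by
        cases hC' : C' with
        | nil => rfl
        | cons b C'' =>
          have hb : c ≤ b := hc_head b (by simp [hC'])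
          rw [List.dropWhile_cons, if_neg (by simp; omega)]
      rw [insAll_cons, ih hs' E hE, htw, hdw, List.takeWhile_cons, List.dropWhile_cons,
        if_neg (by simp; omega), if_neg (by simp; omega)]
      simp only [List.map_nil, List.nil_append]
      rw [show insEv (c, 1) ((s, 0) :: insAll C' E) = (s, 0) :: insEv (c, 1) (insAll C' E) from by
        simp only [insEv]; rw [if_pos (by simp [lexLe]; omega)]]
      rfl

-- ---------- sweeping a run of close events ----------

theorem sweep_closes_noemit : ∀ (C : List Int) (d : Int) (res : List (Int × Int)) (s0 : Int),
    (C.length : Int) < d →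
    (C.map (fun c => ((c : Int), (1 : Int)))).foldl sweepStep (res, d, s0)
      = (res, d - C.length, s0) := by
  intro C
  induction C with
  | nil => intro d res s0 _; simp
  | cons c C' ih =>
    intro d res s0 hd
    simp only [List.length_cons] at hd
    have h1 : ¬ ((1 : Int) = 0) := by omega
    have h2 : ¬ (d - 1 = 0) := by omega
    simp only [List.map_cons, List.foldl_cons, sweepStep, if_neg h1, if_neg h2]
    rw [ih (d - 1) res s0 (by omega)]
    refine Prod.ext_iff.mpr ⟨rfl, Prod.ext_iff.mpr ⟨by simp; omega, rfl⟩⟩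

theorem sweep_closes_emit : ∀ (C : List Int), C ≠ [] → ∀ (res : List (Int × Int)) (s0 : Int),
    (C.map (fun c => ((c : Int), (1 : Int)))).foldl sweepStep (res, (C.length : Int), s0)
      = (res ++ [(s0, lastD C)], 0, s0) := by
  intro C
  induction C with
  | nil => intro h; exact absurd rfl h
  | cons c C' ih =>
    intro _ res s0
    cases C' with
    | nil =>
      simp only [List.map_cons, List.map_nil, List.foldl_cons, List.foldl_nil,
        List.length_cons, List.length_nil, sweepStep, lastD_singleton]
      norm_num
    | cons b C'' =>
      have hne : (b :: C'') ≠ [] := by simp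
      have h1 : ¬ ((1 : Int) = 0) := by omega
      have h2 : ¬ (((c :: b :: C'').length : Int) - 1 = 0) := by simp; omega
      have hstep : sweepStep (res, ((c :: b :: C'').length : Int), s0) ((c : Int), (1 : Int))
          = (res, ((b :: C'').length : Int), s0) := by
        simp only [sweepStep]
        rw [if_neg h1, if_neg h2]
        refine Prod.ext_iff.mpr ⟨rfl, Prod.ext_iff.mpr ⟨by simp, rfl⟩⟩
      rw [List.map_cons, List.foldl_cons, hstep, ih hne res s0, lastD_cons_cons]

theorem insAll_nil_sorted : ∀ (C : List Int), C.Pairwise (· ≤ ·) →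
    insAll C [] = C.map (fun c => ((c : Int), (1 : Int))) := by
  intro C
  induction C with
  | nil => intro _; rfl
  | cons c C' ih =>
    intro hs
    obtain ⟨hc_head, hs'⟩ := List.pairwise_cons.mp hs
    have h : ∀ w ∈ C'.map (fun c => ((c : Int), (1 : Int))), lexP w (c, 1) → w = (c, 1) := by
      intro w hw hlex
      obtain ⟨c', hc'mem, rfl⟩ := List.mem_map.mp hw
      have h1 : c ≤ c' := hc_head c' hc'mem
      rw [lexP_iff] at hlex
      have : c' = c := by simp at hlex ⊢; omega
      rw [this]
    rw [insAll_cons, ih hs', insEv_eq_cons _ _ h]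
    rfl

-- ---------- the main sweep invariant ----------

theorem sweep_main : ∀ (t : List (Int × Int)), t.Pairwise (fun p q => p.1 ≤ q.1) →
    (∀ p ∈ t, p.1 ≤ p.2) →
    ∀ (C : List Int), C ≠ [] → C.Pairwise (· ≤ ·) →
    ∀ (res : List (Int × Int)) (s0 : Int),
    (insAll C (sevs t)).foldl sweepStep (res, (C.length : Int), s0)
      = ((t.foldl mergeStep (res, s0, lastD C)).1
          ++ [((t.foldl mergeStep (res, s0, lastD C)).2.1,
               (t.foldl mergeStep (res, s0, lastD C)).2.2)],
         0, (t.foldl mergeStep (res, s0, lastD C)).2.1) := by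
  intro t
  induction t with
  | nil =>
    intro _ _ C hC hsC res s0
    rw [show sevs [] = ([] : List (Int × Int)) from rfl, insAll_nil_sorted C hsC,
      sweep_closes_emit C hC res s0]
    rfl
  | cons p t' ih =>
    intro hts htw C hC hsC res s0
    obtain ⟨hp_head, hts'⟩ := List.pairwise_cons.mp hts
    have hpw : p.1 ≤ p.2 := htw p (List.mem_cons_self ..)
    have htw' : ∀ q ∈ t', q.1 ≤ q.2 := fun q hq => htw q (List.mem_cons_of_mem _ hq)
    have hE : ∀ w ∈ insEv (p.2, 1) (sevs t'), p.1 ≤ w.1 := by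
      intro w hw
      rcases (mem_insEv _ _ _).mp hw with rfl | hw'
      · simpa using hpw
      · obtain ⟨q, hq, hh⟩ := mem_sevs t' w hw'
        have h1 : p.1 ≤ q.1 := hp_head q hq
        have h2 : q.1 ≤ q.2 := htw' q hq
        rcases hh with rfl | rfl <;> simp <;> omega
    rw [show sevs (p :: t') = (p.1, 0) :: insEv (p.2, 1) (sevs t') from rfl,
      insAll_split p.1 C hsC _ hE, List.foldl_append]
    have hCsplit : C.takeWhile (fun c => decide (c < p.1))
        ++ C.dropWhile (fun c => decide (c < p.1)) = C := List.takeWhile_append_dropWhile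
    have hlen : (C.takeWhile (fun c => decide (c < p.1))).length
        + (C.dropWhile (fun c => decide (c < p.1))).length = C.length := by
      have := congrArg List.length hCsplit
      rwa [List.length_append] at this
    by_cases hCge : C.dropWhile (fun c => decide (c < p.1)) = []
    · -- the whole pending batch closes before this interval opens: emit and restart
      have hClt : C.takeWhile (fun c => decide (c < p.1)) = C := by
        rw [hCge] at hCsplit
        simpa using hCsplit
      have hall : ∀ x ∈ C, decide (x < p.1) = true := List.dropWhile_eq_nil_iff.mp hCge
      have hMlt : lastD C < p.1 := by simpa using hall _ (lastD_mem C hC)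
      rw [hClt, sweep_closes_emit C hC res s0, List.foldl_cons]
      rw [show sweepStep (res ++ [(s0, lastD C)], 0, s0) (p.1, 0)
            = (res ++ [(s0, lastD C)], 1, p.1) from by norm_num [sweepStep]]
      rw [hCge, insAll_nil_E,
        show insEv (p.2, 1) (sevs t') = insAll [p.2] (sevs t') from rfl]
      have hrec := ih hts' htw' [p.2] (by simp) (by simp) (res ++ [(s0, lastD C)]) p.1
      rw [show (([p.2] : List Int).length : Int) = 1 from by norm_num, lastD_singleton] at hrec
      rw [hrec, List.foldl_cons,
        show mergeStep (res, s0, lastD C) p = (res ++ [(s0, lastD C)], p.1, p.2) from by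
          simp only [mergeStep]; rw [if_neg (by omega)]]
    · -- the component continues: fold the new close into the pending batch
      have hgpos : 0 < (C.dropWhile (fun c => decide (c < p.1))).length :=
        List.length_pos_of_ne_nil hCge
      rw [sweep_closes_noemit _ _ res s0 (by omega), List.foldl_cons]
      have hD : (C.length : Int) - ((C.takeWhile (fun c => decide (c < p.1))).length : Int)
          = ((C.dropWhile (fun c => decide (c < p.1))).length : Int) := by omega
      rw [show sweepStep (res, (C.length : Int)
            - ((C.takeWhile (fun c => decide (c < p.1))).length : Int), s0) (p.1, 0)
          = (res, (C.length : Int)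
              - ((C.takeWhile (fun c => decide (c < p.1))).length : Int) + 1,
             if (C.length : Int)
              - ((C.takeWhile (fun c => decide (c < p.1))).length : Int) = 0
             then p.1 else s0) from rfl]
      rw [if_neg (by omega), hD]
      have hcomb : insAll (C.dropWhile (fun c => decide (c < p.1))) (insEv (p.2, 1) (sevs t'))
          = insAll ((C.dropWhile (fun c => decide (c < p.1))) ++ [p.2]) (sevs t') := by
        simp [insAll, List.foldr_append]
      set C2 : List Int :=
        List.orderedInsert (· ≤ ·) p.2 (C.dropWhile (fun c => decide (c < p.1))) with hC2def
      have hperm : ((C.dropWhile (fun c => decide (c < p.1))) ++ [p.2]).Perm C2 :=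
        (List.perm_append_singleton _ _).trans (List.perm_orderedInsert _ _ _).symm
      have hsevs' : (sevs t').Pairwise lexP := sevs_pairwise t' hts' htw'
      have hCge_sorted : (C.dropWhile (fun c => decide (c < p.1))).Pairwise (· ≤ ·) :=
        hsC.sublist (List.dropWhile_sublist _)
      have hC2sorted : C2.Pairwise (· ≤ ·) := List.Pairwise.orderedInsert p.2 _ hCge_sorted
      have hC2len : C2.length = (C.dropWhile (fun c => decide (c < p.1))).length + 1 := by
        have := hperm.length_eq
        simpa using this.symm
      have hC2ne : C2 ≠ [] := by
        intro h
        rw [h] at hC2len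
        simp at hC2len
      have hMge : lastD C = lastD (C.dropWhile (fun c => decide (c < p.1))) := by
        conv_lhs => rw [← hCsplit]
        exact lastD_append _ _ hCge
      have hsM : p.1 ≤ lastD C := by
        rw [hMge]
        exact dropWhile_ge p.1 C hsC _ (lastD_mem _ hCge)
      have hM2 : lastD C2 = max (lastD C) p.2 := by
        have hmax : ∀ c ∈ C2, c ≤ lastD C2 := sorted_lastD_max C2 hC2sorted
        have hmem2 : lastD C2 ∈ C2 := lastD_mem C2 hC2ne
        have hmem3 : lastD C2 ∈ p.2 :: C.dropWhile (fun c => decide (c < p.1)) :=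
          (List.perm_orderedInsert _ _ _).subset hmem2
        have hub : lastD C2 ≤ max (lastD C) p.2 := by
          rcases List.mem_cons.mp hmem3 with h | h
          · omega
          · have := sorted_lastD_max _ hCge_sorted _ h
            rw [hMge]; omega
        have hlb1 : p.2 ≤ lastD C2 :=
          hmax p.2 ((List.perm_orderedInsert _ _ _).symm.subset (List.mem_cons_self ..))
        have hlb2 : lastD C ≤ lastD C2 := by
          refine hmax _ ((List.perm_orderedInsert _ _ _).symm.subset ?_)
          rw [hMge]
          exact List.mem_cons_of_mem _ (lastD_mem _ hCge)
        omega
      rw [hcomb, insAll_congr _ C2 _ hsevs' hperm]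
      have hrec := ih hts' htw' C2 hC2ne hC2sorted res s0
      rw [hC2len] at hrec
      push_cast at hrec
      rw [hM2] at hrec
      rw [hrec, List.foldl_cons,
        show mergeStep (res, s0, lastD C) p = (res, s0, max (lastD C) p.2) from by
          simp only [mergeStep]; rw [if_pos hsM]]

-- ---------- reducing port A to mergeForm ----------

-- A's appending loop builds exactly the spans list
theorem foldl_span (target_y : Int) (coords : List ((Int × Int) × (Int × Int))) :
    ∀ (acc : List (Int × Int)),
    coords.foldl (fun acc c =>
      let radius := manhattan c.1 c.2
      let dy := |target_y - c.1.2|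
      if dy ≤ radius then acc ++ [(c.1.1 - (radius - dy), c.1.1 + (radius - dy))] else acc) acc
    = acc ++ spans coords target_y := by
  induction coords with
  | nil => intro acc; simp [spans]
  | cons c tl ih =>
    intro acc
    simp only [manhattan, spans, List.filterMap_cons] at ih ⊢
    simp only [List.foldl_cons]
    by_cases h : |target_y - c.1.2| ≤ |c.1.1 - c.2.1| + |c.1.2 - c.2.2|
    · rw [if_pos h, ih]
      simp [h]
    · rw [if_neg h, ih]
      simp [h]

-- the accumulator loop with current last (s,e) equals the merge loop carrying (s,e) in its state
theorem foldl_consolidate_eq_mergeStep (l : List (Int × Int))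
    (hwf : ∀ p ∈ l, p.1 ≤ p.2) :
    ∀ (out : List (Int × Int)) (s e : Int),
      l.foldl consolidateStep (out ++ [(s, e)])
      = (l.foldl mergeStep (out, s, e)).1 ++
          [((l.foldl mergeStep (out, s, e)).2.1, (l.foldl mergeStep (out, s, e)).2.2)] := by
  induction l with
  | nil => intro out s e; rfl
  | cons p tl ih =>
    intro out s e
    obtain ⟨s2, e2⟩ := p
    have hp : s2 ≤ e2 := hwf (s2, e2) (List.mem_cons_self ..)
    have hwf' : ∀ q ∈ tl, q.1 ≤ q.2 := fun q hq => hwf q (List.mem_cons_of_mem _ hq)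
    have hstep : consolidateStep (out ++ [(s, e)]) (s2, e2) =
        if e2 ≤ e then out ++ [(s, e)]
        else if s2 ≤ e then out ++ [(s, e2)]
        else (out ++ [(s, e)]) ++ [(s2, e2)] := by
      simp [consolidateStep]
    simp only [List.foldl_cons, hstep, mergeStep]
    by_cases h1 : e2 ≤ e
    · have h2 : s2 ≤ e := le_trans hp h1
      rw [if_pos h1, if_pos h2, max_eq_left h1]
      exact ih hwf' out s e
    · by_cases h2 : s2 ≤ e
      · rw [if_neg h1, if_pos h2, if_pos h2, max_eq_right (by omega : e ≤ e2)]
        exact ih hwf' out s e2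
      · rw [if_neg h1, if_neg h2, if_neg h2]
        exact ih hwf' (out ++ [(s, e)]) s2 e2

-- A's whole consolidate pass equals mergeForm of the same sorted list
theorem consolidate_eq_mergeForm (l : List (Int × Int)) (hwf : ∀ p ∈ l, p.1 ≤ p.2) :
    consolidate l = mergeForm (PySem.List.sorted l (fun p => p.1) false) := by
  unfold consolidate
  cases hsort : PySem.List.sorted l (fun p => p.1) false with
  | nil => rfl
  | cons hd tlr =>
    obtain ⟨s, e⟩ := hd
    have hwfs : ∀ p ∈ tlr, p.1 ≤ p.2 := by
      intro p hp
      apply hwf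
      rw [← PySem.List.mem_sorted l (fun p => p.1) false p, hsort]
      exact List.mem_cons_of_mem _ hp
    simp only [List.foldl_cons, mergeForm]
    have hfirst : consolidateStep [] (s, e) = [] ++ [(s, e)] := by
      simp [consolidateStep]
    rw [hfirst, foldl_consolidate_eq_mergeStep tlr hwfs [] s e]

theorem A_eq_mergeForm (coords : List ((Int × Int) × (Int × Int))) (target_y : Int) :
    find_cannot_contain coords target_y
      = mergeForm (PySem.List.sorted (spans coords target_y) (fun p => p.1) false) := by
  show consolidate (coords.foldl _ []) = _
  rw [foldl_span, List.nil_append]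
  exact consolidate_eq_mergeForm _ (spans_wf coords target_y)

-- ---------- reducing port B to mergeForm ----------

-- B's event-building loop builds exactly the two events of every span
theorem foldl_events (target_y : Int) (coords : List ((Int × Int) × (Int × Int))) :
    ∀ (acc : List (Int × Int)),
    coords.foldl (fun acc c =>
      let radius := |c.1.1 - c.2.1| + |c.1.2 - c.2.2|
      let dy := |target_y - c.1.2|
      if dy ≤ radius then
        acc ++ [(c.1.1 - (radius - dy), 0), (c.1.1 + (radius - dy), 1)]
      else acc) acc
    = acc ++ (spans coords target_y).flatMap evPair := by
  induction coords with
  | nil => intro acc; simp [spans]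
  | cons c tl ih =>
    intro acc
    simp only [spans, List.filterMap_cons] at ih ⊢
    simp only [List.foldl_cons]
    by_cases h : |target_y - c.1.2| ≤ |c.1.1 - c.2.1| + |c.1.2 - c.2.2|
    · rw [if_pos h, ih]
      simp [h, evPair]
    · rw [if_neg h, ih]
      simp [h]

theorem B_eq_mergeForm (coords : List ((Int × Int) × (Int × Int))) (target_y : Int) :
    find_cannot_contain_alt coords target_y
      = mergeForm (PySem.List.sorted (spans coords target_y) (fun p => p.1) false) := by
  show ((PySem.List.sorted2 (coords.foldl _ []) (fun e => e.1) (fun e => e.2) false).foldl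
      sweepStep ([], 0, 0)).1 = _
  rw [foldl_events, List.nil_append,
    sortedEvents_eq_sevs (spans coords target_y) (spans_wf coords target_y)]
  have hLp : (PySem.List.sorted (spans coords target_y) (fun p => p.1) false).Pairwise
      (fun p q => p.1 ≤ q.1) := PySem.List.sorted_pairwise _ _
  have hLw : ∀ p ∈ PySem.List.sorted (spans coords target_y) (fun p => p.1) false, p.1 ≤ p.2 :=
    fun p hp => spans_wf coords target_y p ((PySem.List.mem_sorted _ _ _ p).mp hp)
  cases hL : PySem.List.sorted (spans coords target_y) (fun p => p.1) false with
  | nil => rfl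
  | cons p t' =>
    rw [hL] at hLp hLw
    obtain ⟨_, hts'⟩ := List.pairwise_cons.mp hLp
    have htw' : ∀ q ∈ t', q.1 ≤ q.2 := fun q hq => hLw q (List.mem_cons_of_mem _ hq)
    rw [show sevs (p :: t') = (p.1, 0) :: insEv (p.2, 1) (sevs t') from rfl, List.foldl_cons,
      show sweepStep ([], 0, 0) (p.1, 0) = ([], 1, p.1) from by norm_num [sweepStep],
      show insEv (p.2, 1) (sevs t') = insAll [p.2] (sevs t') from rfl]
    have hrec := sweep_main t' hts' htw' [p.2] (by simp) (by simp) [] p.1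
    rw [show (([p.2] : List Int).length : Int) = 1 from by norm_num, lastD_singleton] at hrec
    rw [hrec]
    rfl

-- ===== VERDICT (by name: the statement is the Claim_ definition above) =====
theorem find_cannot_contain_spec : Claim_equal_find_cannot_contain := by
  intro coords target_y _
  show find_cannot_contain coords target_y = find_cannot_contain_alt coords target_y
  rw [A_eq_mergeForm, B_eq_mergeForm]
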